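-- pv_equiv track=rewrite | github.com/njha7/elbalang_orchestration | infrastructure/flask/src/analyze_dataset.py | get_data_as_list
-- ===== SOURCE A (Python) =====
-- import itertools as it
--
-- def get_data_as_list(file_ptr, delim=None):
--     data_list = []
--     if delim is None:
--         return [i.split() for i in file_ptr]
--     else:
--         _delim = delim[0]
--         for row_ptr in file_ptr:
--             split_row = row_ptr.split()
--             row_iter = it.chain(*[i.split(_delim) for i in split_row])
--             resplit_row = [token for token in row_iter if token is not '']
--             data_list.append(resplit_row)
--     return data_list
-- ===== SOURCE B (Python) =====
-- def _tokens(row, d):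
--     # single pass: treat whitespace and the delimiter char uniformly as separators
--     tokens = []
--     cur = []
--     for ch in row:
--         if ch.isspace() or ch == d:
--             if cur:
--                 tokens.append(''.join(cur))
--                 cur = []
--         else:
--             cur.append(ch)
--     if cur:
--         tokens.append(''.join(cur))
--     return tokens
--
-- def get_data_as_list(file_ptr, delim=None):
--     if delim is None:
--         return [row.split() for row in file_ptr]
--     _delim = delim[0]
--     return [_tokens(row, _delim) for row in file_ptr]
-- ===== Notes on version B (the rewrite author's own statement) =====
-- stated objective: alternative
-- what changed: Replaces A's split/re-split/flatten/filter pipeline (whitespace split, then per-token delimiter split, itertools.chain, then filtering empties) with a single left-to-right character scan per row that treats whitespace and the delimiter character uniformly as separators and accumulates tokens directly.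
import Mathlib
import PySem

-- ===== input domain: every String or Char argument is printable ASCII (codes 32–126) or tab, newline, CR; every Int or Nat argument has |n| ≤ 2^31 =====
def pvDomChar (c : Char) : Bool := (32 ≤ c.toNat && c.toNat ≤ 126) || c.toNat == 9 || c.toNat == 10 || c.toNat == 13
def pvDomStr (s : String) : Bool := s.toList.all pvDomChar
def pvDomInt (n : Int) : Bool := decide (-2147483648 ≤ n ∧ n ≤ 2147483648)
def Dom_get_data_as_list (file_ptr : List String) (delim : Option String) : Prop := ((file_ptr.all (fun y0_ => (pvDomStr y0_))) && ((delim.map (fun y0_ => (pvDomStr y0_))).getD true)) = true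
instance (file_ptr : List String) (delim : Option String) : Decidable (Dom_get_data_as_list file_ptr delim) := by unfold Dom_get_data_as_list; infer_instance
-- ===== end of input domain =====

-- B replaces A's split/re-split/flatten/filter pipeline with a single per-row character
-- scan treating whitespace and the delimiter char uniformly as separators (alternative
-- decomposition, same asymptotic cost).


-- ===== PORT A =====
def get_data_as_list (file_ptr : List String) (delim : Option String) : List (List String) :=
  match delim with
  | none => file_ptr.map (fun i => PySem.Str.split₀ i)
  | some d =>
    match d.toList with
    | [] => []   -- Python: delim[0] raises IndexError here; excluded by Pre_
    | c :: _ =>  -- _delim = delim[0]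
      file_ptr.foldl
        (fun data_list row_ptr =>
          data_list ++
            [((PySem.Str.split₀ row_ptr).flatMap
                (fun i => (PySem.Chars.splitOn i.toList [c]).map String.ofList)).filter
              (fun token => token ≠ "")])
        []

-- ===== PORT B =====
-- helper _tokens of Source B: one pass over the row's characters
def pvTokensB (d : Char) (row : String) : List String :=
  let fin := row.toList.foldl
    (fun (st : List String × List Char) ch =>
      if PySem.Chars.isspace ch || ch == d then
        (if st.2.isEmpty then st else (st.1 ++ [String.ofList st.2], ([] : List Char)))
      else (st.1, st.2 ++ [ch]))
    ([], [])
  if fin.2.isEmpty then fin.1 else fin.1 ++ [String.ofList fin.2]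

def get_data_as_list_alt (file_ptr : List String) (delim : Option String) : List (List String) :=
  match delim with
  | none => file_ptr.map (fun row => PySem.Str.split₀ row)
  | some d =>
    match d.toList with
    | [] => []   -- Python: delim[0] raises IndexError here; excluded by Pre_
    | c :: _ =>
      file_ptr.map (fun row => pvTokensB c row)

-- ===== PRECONDITION & SPEC =====
-- Pre_ excludes only delim = some "" : there both A and B raise IndexError on delim[0].
def Pre_get_data_as_list (file_ptr : List String) (delim : Option String) : Prop :=
  delim.map String.toList ≠ some []
instance (file_ptr : List String) (delim : Option String) : Decidable (Pre_get_data_as_list file_ptr delim) := by unfold Pre_get_data_as_list; infer_instance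

def pvWitness_get_data_as_list : List String × Option String := (["a b,c", " ,,x "], some ",")

def Spec_get_data_as_list (file_ptr : List String) (delim : Option String) (out : List (List String)) : Prop := out = get_data_as_list_alt file_ptr delim
instance (file_ptr : List String) (delim : Option String) (out : List (List String)) : Decidable (Spec_get_data_as_list file_ptr delim out) := by unfold Spec_get_data_as_list; infer_instance

-- ===== CLAIM (what is proved, stated in full; the proofs are below) =====
def Claim_equal_get_data_as_list : Prop := ∀ (file_ptr : List String) (delim : Option String), Dom_get_data_as_list file_ptr delim → Pre_get_data_as_list file_ptr delim → Spec_get_data_as_list file_ptr delim (get_data_as_list file_ptr delim)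

-- ===== LEMMAS AND PROOFS =====

-- separator test of B: whitespace or the delimiter char
def pvSep (c ch : Char) : Bool := PySem.Chars.isspace ch || ch == c

-- tokenizer splitting on pvSep, dropping empty tokens; cur is the pending token
def pvTok (c : Char) : List Char → List Char → List (List Char)
  | [], cur => if cur = [] then [] else [cur]
  | ch :: rest, cur =>
    if pvSep c ch then (if cur = [] then pvTok c rest [] else cur :: pvTok c rest [])
    else pvTok c rest (cur ++ [ch])

-- whitespace-only tokenizer (the str.split() semantics)
def pvTokW : List Char → List Char → List (List Char)
  | [], cur => if cur = [] then [] else [cur]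
  | ch :: rest, cur =>
    if PySem.Chars.isspace ch then (if cur = [] then pvTokW rest [] else cur :: pvTokW rest [])
    else pvTokW rest (cur ++ [ch])

-- single-char delimiter split keeping empty pieces (str.split(c) semantics)
def pvSplitC (c : Char) : List Char → List Char → List (List Char)
  | [], cur => [cur]
  | ch :: rest, cur =>
    if ch == c then cur :: pvSplitC c rest [] else pvSplitC c rest (cur ++ [ch])

theorem pvTokW_go (s : List Char) : ∀ (cur : List Char) (acc : List (List Char)),
    PySem.Chars.split₀.go s cur acc = acc.reverse ++ pvTokW s cur.reverse := by
  induction s with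
  | nil =>
    intro cur acc
    by_cases hc : cur = [] <;> simp [PySem.Chars.split₀.go, pvTokW, hc]
  | cons ch rest ih =>
    intro cur acc
    by_cases hs : PySem.Chars.isspace ch = true
    · by_cases hc : cur = [] <;>
        simp [PySem.Chars.split₀.go, pvTokW, hs, hc, ih, List.append_assoc]
    · simp [PySem.Chars.split₀.go, pvTokW, hs, ih, List.reverse_cons]

theorem pvSplit₀_eq (s : List Char) : PySem.Chars.split₀ s = pvTokW s [] := by
  simpa using pvTokW_go s [] []

theorem pvSplitC_go (c : Char) (l : List Char) : ∀ (fuel : Nat) (cur : List Char) (acc : List (List Char)),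
    l.length ≤ fuel →
    PySem.Chars.splitOn.go [c] fuel l cur acc = acc.reverse ++ pvSplitC c l cur.reverse := by
  induction l with
  | nil =>
    intro fuel cur acc _
    cases fuel <;> simp [PySem.Chars.splitOn.go, pvSplitC]
  | cons ch rest ih =>
    intro fuel cur acc h
    cases fuel with
    | zero => simp at h
    | succ f =>
      have h' : rest.length ≤ f := by simp at h; omega
      by_cases hc : c = ch
      · subst hc
        simp [PySem.Chars.splitOn.go, List.isPrefixOf, pvSplitC,
          ih f [] (cur.reverse :: acc) h', List.append_assoc]
      · have hb : (c == ch) = false := by simp [hc]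
        have hb' : (ch == c) = false := by simp [Ne.symm hc]
        simp [PySem.Chars.splitOn.go, List.isPrefixOf, pvSplitC, hb, hb',
          ih f (ch :: cur) acc h', List.reverse_cons]

theorem pvSplitOn_eq (c : Char) (w : List Char) :
    PySem.Chars.splitOn w [c] = pvSplitC c w [] := by
  simpa [PySem.Chars.splitOn] using pvSplitC_go c w (w.length + 1) [] [] (by omega)

theorem pvSplitC_ne_nil (c : Char) (l : List Char) : ∀ cur, pvSplitC c l cur ≠ [] := by
  induction l with
  | nil => intro cur; simp [pvSplitC]
  | cons ch r ih => intro cur; by_cases h : (ch == c) = true <;> simp [pvSplitC, h, ih]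

theorem pvGetLastD_irrel {α : Type} (l : List α) (h : l ≠ []) (a b : α) :
    l.getLastD a = l.getLastD b := by
  rcases List.eq_nil_or_concat l with rfl | ⟨L, x, rfl⟩
  · exact absurd rfl h
  · simp

theorem pvDecomp {α : Type} (l : List α) (h : l ≠ []) (dflt : α) :
    l.dropLast ++ [l.getLastD dflt] = l := by
  rcases List.eq_nil_or_concat l with h0 | ⟨L, b, rfl⟩
  · exact absurd h0 h
  · simp

theorem pvFilterSingle (L : List Char) :
    List.filter (fun t => !decide (t = [])) [L] = if L = [] then [] else [L] := by
  by_cases h : L = [] <;> simp [h]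

theorem pvSplitC_snoc (c ch : Char) (l : List Char) : ∀ cur,
    pvSplitC c (l ++ [ch]) cur =
      if ch == c then pvSplitC c l cur ++ [[]]
      else (pvSplitC c l cur).dropLast ++ [(pvSplitC c l cur).getLastD [] ++ [ch]] := by
  induction l with
  | nil =>
    intro cur
    by_cases h : (ch == c) = true <;> simp [pvSplitC, h]
  | cons d r ih =>
    intro cur
    by_cases hd : (d == c) = true
    · have hne := pvSplitC_ne_nil c r ([] : List Char)
      by_cases hch : (ch == c) = true
      · simp [pvSplitC, hd, hch, ih]
      · simp only [List.cons_append, pvSplitC, hd, if_true, ih, hch, if_false,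
          Bool.false_eq_true]
        rw [List.dropLast_cons_of_ne_nil hne, List.getLastD_cons,
          pvGetLastD_irrel (pvSplitC c r []) hne cur []]
        simp
    · simp only [List.cons_append, pvSplitC, hd, Bool.false_eq_true, if_false]
      exact ih (cur ++ [d])

theorem pvM (c : Char) (s : List Char) : ∀ cur,
    (pvTokW s cur).flatMap (fun w => (pvSplitC c w []).filter (fun t => !decide (t = []))) =
      ((pvSplitC c cur []).dropLast).filter (fun t => !decide (t = [])) ++
        pvTok c s ((pvSplitC c cur []).getLastD []) := by
  induction s with
  | nil =>
    intro cur
    by_cases hc : cur = []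
    · subst hc; simp [pvTokW, pvTok, pvSplitC]
    · have hne := pvSplitC_ne_nil c cur ([] : List Char)
      have hdec := pvDecomp _ hne ([] : List Char)
      simp only [pvTokW, hc, if_false, List.flatMap_cons, List.flatMap_nil,
        List.append_nil, pvTok]
      conv_lhs => rw [← hdec]
      rw [List.filter_append]
      congr 1
      exact pvFilterSingle _
  | cons ch rest ih =>
    intro cur
    have hne := pvSplitC_ne_nil c cur ([] : List Char)
    have hdec := pvDecomp _ hne ([] : List Char)
    have e0 : (([[]] : List (List Char))).dropLast = [] := rfl
    have e0' : (([[]] : List (List Char))).getLastD [] = [] := rfl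
    have ih0 : (pvTokW rest []).flatMap
        (fun w => (pvSplitC c w []).filter (fun t => !decide (t = []))) = pvTok c rest [] := by
      have h := ih ([] : List Char)
      rw [show pvSplitC c [] [] = [[]] from rfl, e0, e0'] at h
      simpa using h
    by_cases hs : PySem.Chars.isspace ch = true
    · have hsep : pvSep c ch = true := by simp [pvSep, hs]
      by_cases hc : cur = []
      · subst hc
        simp only [pvTokW, hs, if_true]
        simpa [pvTok, hsep, pvSplitC, e0, e0'] using ih0
      · simp only [pvTokW, hs, if_true, hc, if_false, List.flatMap_cons, pvTok, hsep]
        rw [ih0]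
        conv_lhs => rw [← hdec]
        rw [List.filter_append, List.append_assoc]
        congr 1
        rw [pvFilterSingle]
        split_ifs with hL <;> simp
    · by_cases hcc : (ch == c) = true
      · have hsep : pvSep c ch = true := by simp [pvSep, hcc]
        have ihs := ih (cur ++ [ch])
        have e1 : pvSplitC c (cur ++ [ch]) ([] : List Char) = pvSplitC c cur [] ++ [[]] := by
          rw [pvSplitC_snoc]; simp [hcc]
        rw [e1] at ihs
        simp only [List.dropLast_concat] at ihs
        have e2 : (pvSplitC c cur [] ++ [[]]).getLastD [] = [] := by simp
        rw [e2] at ihs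
        simp only [pvTokW, hs, Bool.false_eq_true, if_false]
        rw [ihs]
        simp only [pvTok, hsep, if_true]
        conv_lhs => rw [← hdec]
        rw [List.filter_append, List.append_assoc]
        congr 1
        rw [pvFilterSingle]
        split_ifs with hL <;> simp
      · have hsep : pvSep c ch = false := by simp [pvSep, hs, hcc]
        have ihs := ih (cur ++ [ch])
        have e1 : pvSplitC c (cur ++ [ch]) ([] : List Char) =
            (pvSplitC c cur []).dropLast ++ [(pvSplitC c cur []).getLastD [] ++ [ch]] := by
          rw [pvSplitC_snoc]; simp [hcc]
        rw [e1] at ihs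
        simp only [List.dropLast_concat] at ihs
        have e2 : ((pvSplitC c cur []).dropLast ++ [(pvSplitC c cur []).getLastD [] ++ [ch]]).getLastD []
            = (pvSplitC c cur []).getLastD [] ++ [ch] := by simp
        rw [e2] at ihs
        simp only [pvTokW, hs, Bool.false_eq_true, if_false]
        rw [ihs]
        simp [pvTok, hsep]

-- B-side loop: step and flush as named forms of Source B's loop body
def pvStepB (d : Char) (st : List String × List Char) (ch : Char) : List String × List Char :=
  if PySem.Chars.isspace ch || ch == d then
    (if st.2.isEmpty then st else (st.1 ++ [String.ofList st.2], ([] : List Char)))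
  else (st.1, st.2 ++ [ch])

def pvFlush (st : List String × List Char) : List String :=
  if st.2.isEmpty then st.1 else st.1 ++ [String.ofList st.2]

theorem pvB_aux (d : Char) (s : List Char) : ∀ (ts : List String) (cur : List Char),
    pvFlush (s.foldl (pvStepB d) (ts, cur)) = ts ++ (pvTok d s cur).map String.ofList := by
  induction s with
  | nil =>
    intro ts cur
    by_cases hc : cur = [] <;> simp [pvFlush, pvTok, hc]
  | cons ch rest ih =>
    intro ts cur
    rw [List.foldl_cons]
    by_cases hsep : (PySem.Chars.isspace ch || ch == d) = true
    · by_cases hc : cur = []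
      · subst hc
        simpa [pvStepB, pvTok, pvSep, hsep] using ih ts []
      · simpa [pvStepB, pvTok, pvSep, hsep, hc] using ih (ts ++ [String.ofList cur]) []
    · have hsepF : (PySem.Chars.isspace ch || ch == d) = false := by
        simpa using hsep
      simpa [pvStepB, pvTok, pvSep, hsepF] using ih ts (cur ++ [ch])

theorem pvTokensB_eq (d : Char) (row : String) :
    pvTokensB d row = (pvTok d row.toList []).map String.ofList := by
  have h : pvFlush (List.foldl (pvStepB d) ([], []) row.toList) =
      (pvTok d row.toList []).map String.ofList := by
    simpa using pvB_aux d row.toList [] []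
  exact h

theorem pvOfList_eq_empty_iff (l : List Char) : String.ofList l = "" ↔ l = [] := by
  constructor
  · intro h
    have := congrArg String.toList h
    simpa using this
  · rintro rfl; rfl

theorem pvFilterMapOfList (X : List (List Char)) :
    (X.map String.ofList).filter (fun token => decide (token ≠ "")) =
      (X.filter (fun t => !decide (t = []))).map String.ofList := by
  induction X with
  | nil => rfl
  | cons x xs ih =>
    rw [List.map_cons, List.filter_cons, List.filter_cons]
    by_cases h : x = []
    · have h1 : ¬((decide (String.ofList x ≠ "")) = true) := by
        simp [pvOfList_eq_empty_iff, h]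
      have h2 : ¬((!decide (x = [])) = true) := by simp [h]
      rw [if_neg h1, if_neg h2]
      exact ih
    · have h1 : (decide (String.ofList x ≠ "")) = true := by
        simp [pvOfList_eq_empty_iff, h]
      have h2 : (!decide (x = [])) = true := by simp [h]
      rw [if_pos h1, if_pos h2, List.map_cons, ih]

theorem pvRow_eq (c : Char) (row : String) :
    ((PySem.Str.split₀ row).flatMap
        (fun i => (PySem.Chars.splitOn i.toList [c]).map String.ofList)).filter
      (fun token => token ≠ "") = pvTokensB c row := by
  have hsplit : PySem.Str.split₀ row = (PySem.Chars.split₀ row.toList).map String.ofList := rfl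
  rw [hsplit, List.flatMap_map]
  simp only [String.toList_ofList, pvSplitOn_eq]
  rw [List.filter_flatMap]
  simp only [pvFilterMapOfList]
  rw [← List.map_flatMap, pvSplit₀_eq]
  have hm : (pvTokW row.toList []).flatMap
      (fun w => (pvSplitC c w []).filter (fun t => !decide (t = []))) =
        pvTok c row.toList [] := by
    have h := pvM c row.toList []
    rw [show pvSplitC c [] [] = [[]] from rfl,
      show (([[]] : List (List Char))).dropLast = [] from rfl,
      show (([[]] : List (List Char))).getLastD [] = [] from rfl] at h
    simpa using h
  rw [hm, pvTokensB_eq]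

-- ===== VERDICT (by name: the statement is the Claim_ definition above) =====
theorem get_data_as_list_spec : Claim_equal_get_data_as_list := by
  intro file_ptr delim _hdom hpre
  unfold Spec_get_data_as_list
  cases delim with
  | none => rfl
  | some d =>
    cases hd : d.toList with
    | nil =>
      exact absurd (by simp [hd]) hpre
    | cons c t =>
      simp only [get_data_as_list, get_data_as_list_alt, hd]
      rw [PySem.List.foldl_append_singleton_eq_map
        (fun row_ptr =>
          ((PySem.Str.split₀ row_ptr).flatMap
              (fun i => (PySem.Chars.splitOn i.toList [c]).map String.ofList)).filter
            (fun token => token ≠ "")) file_ptr []]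
      exact List.map_congr_left (fun row _ => pvRow_eq c row)
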